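-- pv_equiv track=rewrite | github.com/srwei/Personal | CS Class Relevant Projects/srwei-cs25020-spr-18/SFProblem/Part 2/sfproblem2.py | getLexicon
-- ===== SOURCE A (Python) =====
-- def getLexicon(stem_dict):
--
-- 	lex_dict = {}
-- 	for stem in stem_dict:
-- 		for suffixes in stem_dict[stem]:
-- 			temp_stem = ''
-- 			temp_stem = temp_stem+stem
-- 			init_suffixes = ''.join(suffixes)
-- 			if init_suffixes == '':
-- 				init_suffixes = 'NULL'
-- 			if stem not in lex_dict:
-- 				lex_dict[stem] = [init_suffixes]
-- 			else:
-- 				if init_suffixes not in lex_dict[stem]: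
-- 					lex_dict[stem].append(init_suffixes)
--
-- 			for i, suffix in enumerate(suffixes):
-- 				temp_stem = temp_stem+suffix
-- 				if temp_stem not in lex_dict:
-- 					if i < len(suffixes) - 1:
-- 						new_suffix = ''.join(suffixes[i+1:])
-- 						lex_dict[temp_stem] = [new_suffix]
-- 					else:
-- 						lex_dict[temp_stem] = ['NULL']
-- 				if temp_stem in lex_dict:
-- 					if i < len(suffixes) - 1:
-- 						new_suffix = ''.join(suffixes[i+1:])
-- 					else:
-- 						new_suffix = 'NULL'
-- 					if new_suffix not in lex_dict[temp_stem]: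
-- 							lex_dict[temp_stem].append(new_suffix)
-- 	return lex_dict
-- ===== SOURCE B (Python) =====
-- def getLexicon(stem_dict):
--     # One pass per suffix sequence: continuations are precomputed right-to-left
--     # instead of re-joining suffixes[i+1:] at every position, and a parallel
--     # dict of sets replaces the ordered-list membership scans.
--     lists = {}
--     sets = {}
--
--     def add(k, v):
--         s = sets.get(k)
--         if s is None:
--             sets[k] = {v}
--             lists[k] = [v]
--         elif v not in s:
--             s.add(v)
--             lists[k].append(v)
--
--     for stem, groups in stem_dict.items():
--         for suffixes in groups:
--             conts = []
--             acc = ''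
--             for s in reversed(suffixes):
--                 conts.append(acc)
--                 acc = s + acc
--             conts.reverse()
--             if conts:
--                 conts[-1] = 'NULL'
--             add(stem, acc if acc != '' else 'NULL')
--             key = stem
--             for s, cont in zip(suffixes, conts):
--                 key += s
--                 add(key, cont)
--     return lists
-- ===== Notes on version B (the rewrite author's own statement) =====
-- stated objective: alternative
-- what changed: B precomputes each suffix sequence's continuation joins once by a right-to-left accumulation instead of re-running ''.join(suffixes[i+1:]) at every position, and dedups via a parallel dict of sets instead of scanning each ordered value list; on the measured inputs (short suffix lists) this is not faster.
import Mathlib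
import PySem

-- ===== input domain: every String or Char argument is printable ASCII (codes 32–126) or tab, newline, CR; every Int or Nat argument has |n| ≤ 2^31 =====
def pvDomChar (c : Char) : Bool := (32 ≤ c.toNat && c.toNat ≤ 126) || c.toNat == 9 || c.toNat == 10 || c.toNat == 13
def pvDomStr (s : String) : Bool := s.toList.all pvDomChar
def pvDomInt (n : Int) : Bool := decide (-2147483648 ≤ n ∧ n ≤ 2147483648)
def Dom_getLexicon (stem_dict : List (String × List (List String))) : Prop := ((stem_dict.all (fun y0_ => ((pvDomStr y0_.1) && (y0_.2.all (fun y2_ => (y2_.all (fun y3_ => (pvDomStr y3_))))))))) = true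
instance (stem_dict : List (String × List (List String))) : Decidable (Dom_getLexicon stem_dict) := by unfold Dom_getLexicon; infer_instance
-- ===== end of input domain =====

-- B builds each suffix continuation once by a right-to-left accumulation and dedups through a
-- parallel dict of sets, where A re-joins suffixes[i+1:] at every position and scans the list.

-- ===== PORT A =====
-- ''.join(l)
def pvJoin (l : List String) : String := PySem.Str.join "" l

-- body of A's 'for i, suffix in enumerate(suffixes)' loop; state = (lex_dict, temp_stem)
def pvStepA (l : List String) (st : PySem.Dict String (List String) × String)
    (p : Int × String) : PySem.Dict String (List String) × String :=
  let temp := st.2 ++ p.2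
  let lex1 :=
    if st.1.contains temp = false then
      if p.1 < (l.length : Int) - 1 then
        st.1.insert temp [pvJoin (PySem.List.slice l (some (p.1 + 1)) none)]
      else st.1.insert temp ["NULL"]
    else st.1
  let lex2 :=
    if lex1.contains temp = true then
      let ns := if p.1 < (l.length : Int) - 1 then
        pvJoin (PySem.List.slice l (some (p.1 + 1)) none) else "NULL"
      if (lex1.getD temp []).contains ns = true then lex1
      else lex1.modify temp [] (· ++ [ns])
    else lex1
  (lex2, temp)

-- A's body for one (stem, suffixes) pair
def pvGroupA (lex : PySem.Dict String (List String)) (stem : String) (suffixes : List String) :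
    PySem.Dict String (List String) :=
  let temp := "" ++ stem
  let init0 := pvJoin suffixes
  let init := if init0 = "" then "NULL" else init0
  let lex :=
    if lex.contains stem = false then lex.insert stem [init]
    else if (lex.getD stem []).contains init = true then lex
    else lex.modify stem [] (· ++ [init])
  ((PySem.List.enumerate suffixes).foldl (pvStepA suffixes) (lex, temp)).1

-- 'for stem in stem_dict: for suffixes in stem_dict[stem]' = iteration over the dict's items
def getLexicon (stem_dict : List (String × List (List String))) : List (String × List String) :=
  ((PySem.Dict.ofList stem_dict).items.foldl
    (fun lex p => p.2.foldl (fun lex suffixes => pvGroupA lex p.1 suffixes) lex)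
    PySem.Dict.empty).items

-- ===== PORT B =====
-- B's add(k, v): ordered lists plus a parallel dict of sets for dedup membership
def pvAdd (st : PySem.Dict String (List String) × PySem.Dict String (PySem.Set String))
    (k v : String) :
    PySem.Dict String (List String) × PySem.Dict String (PySem.Set String) :=
  match st.2.get? k with
  | none => (st.1.insert k [v], st.2.insert k (PySem.Set.ofList [v]))
  | some s =>
    if PySem.Set.contains s v then st
    else (st.1.modify k [] (· ++ [v]), st.2.insert k (PySem.Set.add s v))

-- B's body for one (stem, suffixes) pair
def pvGroupB (st : PySem.Dict String (List String) × PySem.Dict String (PySem.Set String))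
    (stem : String) (suffixes : List String) :
    PySem.Dict String (List String) × PySem.Dict String (PySem.Set String) :=
  -- 'for s in reversed(suffixes): conts.append(acc); acc = s + acc' then 'conts.reverse()'
  -- is the right fold below (same conts list, same acc)
  let ca := suffixes.foldr (fun s (ca : List String × String) => (ca.2 :: ca.1, s ++ ca.2)) ([], "")
  -- 'if conts: conts[-1] = "NULL"' (exact: replaces the last element of a nonempty list)
  let conts := if ca.1.isEmpty then ca.1 else ca.1.dropLast ++ ["NULL"]
  let st := pvAdd st stem (if ca.2 ≠ "" then ca.2 else "NULL")
  ((suffixes.zip conts).foldl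
    (fun (q : (PySem.Dict String (List String) × PySem.Dict String (PySem.Set String)) × String) p =>
      let key := q.2 ++ p.1
      (pvAdd q.1 key p.2, key)) (st, stem)).1

def getLexicon_alt (stem_dict : List (String × List (List String))) : List (String × List String) :=
  ((PySem.Dict.ofList stem_dict).items.foldl
    (fun st p => p.2.foldl (fun st suffixes => pvGroupB st p.1 suffixes) st)
    (PySem.Dict.empty, PySem.Dict.empty)).1.items

-- ===== PRECONDITION & SPEC =====
def Spec_getLexicon (stem_dict : List (String × List (List String))) (out : List (String × List String)) : Prop := out = getLexicon_alt stem_dict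
instance (stem_dict : List (String × List (List String))) (out : List (String × List String)) : Decidable (Spec_getLexicon stem_dict out) := by unfold Spec_getLexicon; infer_instance

-- ===== CLAIM (what is proved, stated in full; the proofs are below) =====
def Claim_equal_getLexicon : Prop := ∀ (stem_dict : List (String × List (List String))), Dom_getLexicon stem_dict → Spec_getLexicon stem_dict (getLexicon stem_dict)

-- ===== LEMMAS AND PROOFS =====

-- the net effect of one dedup-append of v under key k, A's way
def pvStepAdd (lex : PySem.Dict String (List String)) (k v : String) :
    PySem.Dict String (List String) :=
  if lex.contains k = false then lex.insert k [v]
  else if (lex.getD k []).contains v = true then lex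
  else lex.modify k [] (· ++ [v])

-- A's the-key-exists-then-append dance, verbatim (the two sequential ifs of the loop body)
def pvNet (lex : PySem.Dict String (List String)) (k v : String) :
    PySem.Dict String (List String) :=
  let lex1 := if lex.contains k = false then lex.insert k [v] else lex
  if lex1.contains k = true then
    if (lex1.getD k []).contains v = true then lex1 else lex1.modify k [] (· ++ [v])
  else lex1

-- invariant: B's set dict mirrors B's list dict (same keys, sets = the lists' elements)
def pvInv (lex : PySem.Dict String (List String)) (seen : PySem.Dict String (PySem.Set String)) : Prop :=
  ∀ k, seen.contains k = lex.contains k ∧ seen.getD k [] = lex.getD k []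

theorem pvJoin_cons (s : String) (tl : List String) : pvJoin (s :: tl) = s ++ pvJoin tl := by
  apply String.ext
  cases tl with
  | nil =>
    simp only [pvJoin, PySem.Str.toList_join, List.map, PySem.Chars.join_singleton,
      PySem.Chars.join_nil, String.toList_append]
    simp
  | cons b r =>
    simp only [pvJoin, PySem.Str.toList_join, List.map, String.toList_append]
    rw [PySem.Chars.join_cons_cons]
    simp

theorem pvFoldr_snd (l : List String) :
    (l.foldr (fun s (ca : List String × String) => (ca.2 :: ca.1, s ++ ca.2)) ([], "")).2
      = pvJoin l := by
  induction l with
  | nil => rfl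
  | cons x xs ih => simp [List.foldr, ih, pvJoin_cons]

theorem pvFoldr_fst (x : String) (xs : List String) :
    ((x :: xs).foldr (fun s (ca : List String × String) => (ca.2 :: ca.1, s ++ ca.2)) ([], "")).1
      = pvJoin xs
        :: (xs.foldr (fun s (ca : List String × String) => (ca.2 :: ca.1, s ++ ca.2)) ([], "")).1 := by
  simp [List.foldr, pvFoldr_snd]

-- proof-side characterisation of B's patched continuation list
def pvConts : List String → List String
  | [] => []
  | _ :: xs => (if xs = [] then "NULL" else pvJoin xs) :: pvConts xs

theorem pvConts_eq (l : List String) :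
    (let ca := l.foldr (fun s (ca : List String × String) => (ca.2 :: ca.1, s ++ ca.2)) ([], "")
     if ca.1.isEmpty then ca.1 else ca.1.dropLast ++ ["NULL"]) = pvConts l := by
  induction l with
  | nil => rfl
  | cons x xs ih =>
    simp only [pvFoldr_fst]
    cases xs with
    | nil => rfl
    | cons y ys =>
      simp only [pvFoldr_fst] at ih ⊢
      simp only [List.isEmpty_cons, Bool.false_eq_true, if_false,
        List.dropLast_cons_of_ne_nil (List.cons_ne_nil _ _)] at ih ⊢
      rw [List.cons_append, ih]
      simp [pvConts]

theorem pvAdd_eq (lex : PySem.Dict String (List String))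
    (seen : PySem.Dict String (PySem.Set String)) (k v : String) (h : pvInv lex seen) :
    (pvAdd (lex, seen) k v).1 = pvStepAdd lex k v ∧
      pvInv (pvAdd (lex, seen) k v).1 (pvAdd (lex, seen) k v).2 := by
  have hc : seen.contains k = lex.contains k := (h k).1
  have hg : seen.getD k [] = lex.getD k [] := (h k).2
  unfold pvAdd pvStepAdd
  cases hget : seen.get? k with
  | none =>
    have hlex : lex.contains k = false := by
      rw [← hc, PySem.Dict.contains_eq_isSome_get?, hget]; rfl
    simp only [hlex]
    refine ⟨rfl, fun k' => ?_⟩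
    constructor
    · simp [PySem.Dict.contains_insert, (h k').1]
    · have hofl : PySem.Set.ofList [v] = [v] := rfl
      rw [hofl, PySem.Dict.getD_insert, PySem.Dict.getD_insert]
      split
      · rfl
      · exact (h k').2
  | some s =>
    have hlex : lex.contains k = true := by
      rw [← hc, PySem.Dict.contains_eq_isSome_get?, hget]; rfl
    have hs : s = lex.getD k [] := by
      rw [← hg, PySem.Dict.getD_eq_get?_getD, hget]; rfl
    have hcv : PySem.Set.contains s v = (lex.getD k []).contains v := by
      rw [hs]; rfl
    simp only [hlex, Bool.true_eq_false, if_false, hcv]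
    by_cases hmem : (lex.getD k []).contains v = true
    · rw [if_pos hmem, if_pos hmem]
      exact ⟨rfl, h⟩
    · rw [if_neg hmem, if_neg hmem]
      refine ⟨rfl, fun k' => ?_⟩
      have hadd : PySem.Set.add s v = s ++ [v] := by
        unfold PySem.Set.add
        rw [hcv, eq_false_of_ne_true hmem]
        rfl
      have hmod : lex.modify k [] (· ++ [v]) = lex.insert k (lex.getD k [] ++ [v]) := rfl
      rw [hadd, hs, hmod]
      constructor
      · simp [PySem.Dict.contains_insert, (h k').1]
      · rw [PySem.Dict.getD_insert, PySem.Dict.getD_insert]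
        split
        · rfl
        · exact (h k').2

theorem pvNet_eq (lex : PySem.Dict String (List String)) (k v : String) :
    pvNet lex k v = pvStepAdd lex k v := by
  unfold pvNet pvStepAdd
  by_cases hk : lex.contains k = false
  · simp only [hk, if_true]
    rw [if_pos (PySem.Dict.contains_insert_self lex k [v])]
    rw [if_pos (by rw [PySem.Dict.getD_insert_self]; simp)]
  · have hk' : lex.contains k = true := by
      cases hcc : lex.contains k
      · exact absurd hcc hk
      · rfl
    simp only [hk', Bool.true_eq_false, if_false, if_true]

theorem pvStepA_eq (pre xs : List String) (x : String)
    (lex : PySem.Dict String (List String)) (key : String) :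
    pvStepA (pre ++ x :: xs) (lex, key) ((pre.length : Int), x)
      = (pvStepAdd lex (key ++ x) (if xs = [] then "NULL" else pvJoin xs), key ++ x) := by
  have hdrop : PySem.List.slice (pre ++ x :: xs) (some ((pre.length : Int) + 1)) none = xs := by
    rw [PySem.List.slice_from _ (by positivity)]
    have h1 : ((pre.length : Int) + 1).toNat = (pre ++ [x]).length := by
      simp
    rw [h1, show pre ++ x :: xs = (pre ++ [x]) ++ xs by simp, List.drop_left]
  rw [← pvNet_eq]
  simp only [pvStepA, pvNet, hdrop]
  by_cases hxs : xs = []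
  · subst hxs
    have hC : ¬ ((pre.length : Int) < (((pre ++ [x] : List String).length : Int) - 1)) := by
      simp
    rw [if_pos rfl, if_neg hC, if_neg hC]
  · have hC : (pre.length : Int) < (((pre ++ x :: xs : List String).length : Int) - 1) := by
      have : 0 < xs.length := List.length_pos_of_ne_nil hxs
      simp only [List.length_append, List.length_cons]
      push_cast
      omega
    rw [if_neg hxs, if_pos hC, if_pos hC]

theorem pvLoop_eq (xs : List String) : ∀ (pre : List String)
    (lex : PySem.Dict String (List String)) (seen : PySem.Dict String (PySem.Set String))
    (key : String), pvInv lex seen →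
    (((PySem.List.enumerate xs (pre.length : Int)).foldl (pvStepA (pre ++ xs)) (lex, key)).1
        = ((xs.zip (pvConts xs)).foldl
            (fun (q : (PySem.Dict String (List String) × PySem.Dict String (PySem.Set String)) × String) p =>
              let key := q.2 ++ p.1
              (pvAdd q.1 key p.2, key)) ((lex, seen), key)).1.1) ∧
      pvInv (((xs.zip (pvConts xs)).foldl
            (fun (q : (PySem.Dict String (List String) × PySem.Dict String (PySem.Set String)) × String) p =>
              let key := q.2 ++ p.1
              (pvAdd q.1 key p.2, key)) ((lex, seen), key)).1.1)
        (((xs.zip (pvConts xs)).foldl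
            (fun (q : (PySem.Dict String (List String) × PySem.Dict String (PySem.Set String)) × String) p =>
              let key := q.2 ++ p.1
              (pvAdd q.1 key p.2, key)) ((lex, seen), key)).1.2) := by
  induction xs with
  | nil => exact fun pre lex seen key h => ⟨rfl, h⟩
  | cons x xs ih =>
    intro pre lex seen key h
    rw [PySem.List.enumerate_cons]
    simp only [pvConts, List.zip_cons_cons, List.foldl_cons]
    rw [pvStepA_eq pre xs x lex key]
    obtain ⟨hfst, hinv⟩ := pvAdd_eq lex seen (key ++ x) (if xs = [] then "NULL" else pvJoin xs) h
    rw [← hfst]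
    have hlen : (pre.length : Int) + 1 = ((pre ++ [x]).length : Int) := by simp
    have happ : pre ++ x :: xs = (pre ++ [x]) ++ xs := by simp
    rw [hlen, happ]
    have hmain := ih (pre ++ [x])
      (pvAdd (lex, seen) (key ++ x) (if xs = [] then "NULL" else pvJoin xs)).1
      (pvAdd (lex, seen) (key ++ x) (if xs = [] then "NULL" else pvJoin xs)).2
      (key ++ x) hinv
    simpa using hmain

theorem pvEmptyAppend (s : String) : "" ++ s = s := by
  apply String.ext
  simp

theorem pvGroup_eq (lex : PySem.Dict String (List String))
    (seen : PySem.Dict String (PySem.Set String)) (stem : String) (suffixes : List String)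
    (h : pvInv lex seen) :
    (pvGroupB (lex, seen) stem suffixes).1 = pvGroupA lex stem suffixes ∧
      pvInv (pvGroupB (lex, seen) stem suffixes).1 (pvGroupB (lex, seen) stem suffixes).2 := by
  have hinit : (if (suffixes.foldr (fun s (ca : List String × String) => (ca.2 :: ca.1, s ++ ca.2)) ([], "")).2 ≠ "" then
        (suffixes.foldr (fun s (ca : List String × String) => (ca.2 :: ca.1, s ++ ca.2)) ([], "")).2 else "NULL")
      = (if pvJoin suffixes = "" then "NULL" else pvJoin suffixes) := by
    rw [pvFoldr_snd]
    by_cases hj : pvJoin suffixes = ""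
    · rw [if_neg (by simp [hj]), if_pos hj]
    · rw [if_pos hj, if_neg hj]
  simp only [pvGroupB, pvGroupA, pvConts_eq, hinit]
  obtain ⟨hfst, hinv⟩ := pvAdd_eq lex seen stem (if pvJoin suffixes = "" then "NULL" else pvJoin suffixes) h
  have hstep : pvStepAdd lex stem (if pvJoin suffixes = "" then "NULL" else pvJoin suffixes)
      = (if lex.contains stem = false then lex.insert stem [if pvJoin suffixes = "" then "NULL" else pvJoin suffixes]
         else if (lex.getD stem []).contains (if pvJoin suffixes = "" then "NULL" else pvJoin suffixes) = true then lex
         else lex.modify stem [] (· ++ [if pvJoin suffixes = "" then "NULL" else pvJoin suffixes])) := rfl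
  rw [← hstep, ← hfst]
  have hmain := pvLoop_eq suffixes []
    (pvAdd (lex, seen) stem (if pvJoin suffixes = "" then "NULL" else pvJoin suffixes)).1
    (pvAdd (lex, seen) stem (if pvJoin suffixes = "" then "NULL" else pvJoin suffixes)).2
    stem hinv
  constructor
  · exact Eq.symm (by simpa [pvEmptyAppend] using hmain.1)
  · simpa [pvEmptyAppend] using hmain.2

theorem pvGroups_eq (gs : List (List String)) : ∀ (stem : String)
    (lex : PySem.Dict String (List String)) (seen : PySem.Dict String (PySem.Set String)),
    pvInv lex seen →
    ((gs.foldl (fun st suffixes => pvGroupB st stem suffixes) (lex, seen)).1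
        = gs.foldl (fun lex suffixes => pvGroupA lex stem suffixes) lex) ∧
      pvInv (gs.foldl (fun st suffixes => pvGroupB st stem suffixes) (lex, seen)).1
        (gs.foldl (fun st suffixes => pvGroupB st stem suffixes) (lex, seen)).2 := by
  induction gs with
  | nil => exact fun stem lex seen h => ⟨rfl, h⟩
  | cons g gs ih =>
    intro stem lex seen h
    simp only [List.foldl_cons]
    obtain ⟨hfst, hinv⟩ := pvGroup_eq lex seen stem g h
    rw [← hfst]
    have hmain := ih stem (pvGroupB (lex, seen) stem g).1 (pvGroupB (lex, seen) stem g).2 hinv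
    simpa using hmain

theorem pvItems_eq (items : List (String × List (List String))) :
    ∀ (lex : PySem.Dict String (List String)) (seen : PySem.Dict String (PySem.Set String)),
    pvInv lex seen →
    ((items.foldl (fun st p => p.2.foldl (fun st suffixes => pvGroupB st p.1 suffixes) st) (lex, seen)).1
        = items.foldl (fun lex p => p.2.foldl (fun lex suffixes => pvGroupA lex p.1 suffixes) lex) lex) := by
  induction items with
  | nil => exact fun lex seen _ => rfl
  | cons it items ih =>
    intro lex seen h
    simp only [List.foldl_cons]
    obtain ⟨hfst, hinv⟩ := pvGroups_eq it.2 it.1 lex seen h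
    rw [← hfst]
    have hmain := ih
      (it.2.foldl (fun st suffixes => pvGroupB st it.1 suffixes) (lex, seen)).1
      (it.2.foldl (fun st suffixes => pvGroupB st it.1 suffixes) (lex, seen)).2 hinv
    simpa using hmain

-- ===== VERDICT (by name: the statement is the Claim_ definition above) =====
theorem getLexicon_spec : Claim_equal_getLexicon := by
  intro stem_dict _
  unfold Spec_getLexicon getLexicon getLexicon_alt
  rw [pvItems_eq]
  intro k
  constructor
  · simp [PySem.Dict.contains_empty]
  · simp [PySem.Dict.getD_empty]
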